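-- pv_equiv track=rewrite | github.com/DawoonJeong-git/DRT-scheduling | server/gantt_builder.py | _pick_dispatch_info
-- ===== SOURCE A (Python) =====
-- def _pick_dispatch_info(dispatch_rows, rr_rows):
--     def first_nonempty_from(rows, key):
--         for r in rows:
--             v = r.get(key)
--             if v is None:
--                 continue
--             s = str(v).strip()
--             if s != "" and s.lower() != "null":
--                 return s
--         return ""
--
--     pickupStationName = first_nonempty_from(dispatch_rows, "pickupStationName")
--     dropoffStationName = first_nonempty_from(dispatch_rows, "dropoffStationName")
--     pickupStationID = first_nonempty_from(dispatch_rows, "pickupStationID")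
--     dropoffStationID = first_nonempty_from(dispatch_rows, "dropoffStationID")
--     reserveType = first_nonempty_from(dispatch_rows, "reserveType")
--
--     if not reserveType:
--         reserveType = first_nonempty_from(rr_rows, "reserveType")
--     if not pickupStationID:
--         pickupStationID = first_nonempty_from(rr_rows, "pickupStationID")
--     if not dropoffStationID:
--         dropoffStationID = first_nonempty_from(rr_rows, "dropoffStationID")
--
--     return {
--         "pickupStationName": pickupStationName,
--         "dropoffStationName": dropoffStationName,
--         "pickupStationID": pickupStationID,
--         "dropoffStationID": dropoffStationID,
--         "reserveType": reserveType,
--     }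
-- ===== SOURCE B (Python) =====
-- def _pick_dispatch_info(dispatch_rows, rr_rows):
--     def clean(v):
--         # None, empty-after-strip, and 'null' (case-insensitive) all count as missing
--         if v is None:
--             return None
--         s = str(v).strip()
--         if s and s.lower() != "null":
--             return s
--         return None
--
--     pn = dn = pid = did = rt = ""
--     for r in dispatch_rows:
--         if not pn:
--             pn = clean(r.get("pickupStationName")) or ""
--         if not dn:
--             dn = clean(r.get("dropoffStationName")) or ""
--         if not pid:
--             pid = clean(r.get("pickupStationID")) or ""
--         if not did:
--             did = clean(r.get("dropoffStationID")) or ""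
--         if not rt:
--             rt = clean(r.get("reserveType")) or ""
--     for r in rr_rows:
--         if not rt:
--             rt = clean(r.get("reserveType")) or ""
--         if not pid:
--             pid = clean(r.get("pickupStationID")) or ""
--         if not did:
--             did = clean(r.get("dropoffStationID")) or ""
--     return {
--         "pickupStationName": pn,
--         "dropoffStationName": dn,
--         "pickupStationID": pid,
--         "dropoffStationID": did,
--         "reserveType": rt,
--     }
-- ===== Notes on version B (the rewrite author's own statement) =====
-- stated objective: alternative
-- what changed: Replaces A's five (plus three fallback) independent short-circuiting scans of the row lists, one per key, with a single pass over dispatch_rows maintaining all five slots (filling each only while still empty) and a single pass over rr_rows for the three fallback keys.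
import Mathlib
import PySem

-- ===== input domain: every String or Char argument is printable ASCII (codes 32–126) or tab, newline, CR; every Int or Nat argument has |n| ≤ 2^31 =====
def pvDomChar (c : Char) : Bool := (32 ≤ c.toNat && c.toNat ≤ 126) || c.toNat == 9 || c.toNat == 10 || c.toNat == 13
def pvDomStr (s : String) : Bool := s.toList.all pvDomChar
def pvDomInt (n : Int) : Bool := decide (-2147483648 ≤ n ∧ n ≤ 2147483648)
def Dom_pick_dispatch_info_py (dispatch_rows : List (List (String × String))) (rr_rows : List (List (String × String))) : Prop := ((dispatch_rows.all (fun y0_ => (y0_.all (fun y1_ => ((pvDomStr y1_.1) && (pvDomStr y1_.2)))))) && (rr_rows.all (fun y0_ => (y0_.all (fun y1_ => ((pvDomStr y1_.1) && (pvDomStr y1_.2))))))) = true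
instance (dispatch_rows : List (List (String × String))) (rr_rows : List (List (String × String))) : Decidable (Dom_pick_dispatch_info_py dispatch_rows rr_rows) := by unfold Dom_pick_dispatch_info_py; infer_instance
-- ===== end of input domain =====

-- B replaces A's five independent short-circuiting scans per key with a single pass over each
-- row list that fills still-empty slots (objective: alternative decomposition, same cost).

-- ===== PORT A =====
-- inner helper `first_nonempty_from(rows, key)`: scan rows, return first valid stripped value, else ""
def pvFirstNonemptyFrom (rows : List (List (String × String))) (key : String) : String :=
  match rows with
  | [] => ""
  | r :: rs =>
    match (PySem.Dict.mk r).get? key with          -- r.get(key); v is None → continue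
    | none => pvFirstNonemptyFrom rs key
    | some v =>
      let s := PySem.Str.strip v                   -- str(v).strip(); values are str so str(v) = v
      if s ≠ "" ∧ PySem.Str.lower s ≠ "null" then s else pvFirstNonemptyFrom rs key

def pick_dispatch_info_py (dispatch_rows : List (List (String × String))) (rr_rows : List (List (String × String))) : List (String × String) :=
  let pickupStationName := pvFirstNonemptyFrom dispatch_rows "pickupStationName"
  let dropoffStationName := pvFirstNonemptyFrom dispatch_rows "dropoffStationName"
  let pickupStationID := pvFirstNonemptyFrom dispatch_rows "pickupStationID"
  let dropoffStationID := pvFirstNonemptyFrom dispatch_rows "dropoffStationID"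
  let reserveType := pvFirstNonemptyFrom dispatch_rows "reserveType"
  -- `if not x:` — x is a string, falsy iff ""
  let reserveType := if reserveType = "" then pvFirstNonemptyFrom rr_rows "reserveType" else reserveType
  let pickupStationID := if pickupStationID = "" then pvFirstNonemptyFrom rr_rows "pickupStationID" else pickupStationID
  let dropoffStationID := if dropoffStationID = "" then pvFirstNonemptyFrom rr_rows "dropoffStationID" else dropoffStationID
  [("pickupStationName", pickupStationName),
   ("dropoffStationName", dropoffStationName),
   ("pickupStationID", pickupStationID),
   ("dropoffStationID", dropoffStationID),
   ("reserveType", reserveType)]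

-- ===== PORT B =====
-- Source B's `clean(v)`: None for missing/empty/'null', else the stripped value
def pvClean (v : Option String) : Option String :=
  match v with
  | none => none
  | some v =>
    let s := PySem.Str.strip v
    if s ≠ "" ∧ PySem.Str.lower s ≠ "null" then some s else none

-- Source B's `if not x: x = clean(r.get(key)) or ""` applied to one slot
def pvFill (x : String) (r : List (String × String)) (key : String) : String :=
  if x = "" then (pvClean ((PySem.Dict.mk r).get? key)).getD "" else x

def pick_dispatch_info_py_alt (dispatch_rows : List (List (String × String))) (rr_rows : List (List (String × String))) : List (String × String) :=
  let st := dispatch_rows.foldl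
    (fun (st : String × String × String × String × String) r =>
      (pvFill st.1 r "pickupStationName",
       pvFill st.2.1 r "dropoffStationName",
       pvFill st.2.2.1 r "pickupStationID",
       pvFill st.2.2.2.1 r "dropoffStationID",
       pvFill st.2.2.2.2 r "reserveType"))
    ("", "", "", "", "")
  let st2 := rr_rows.foldl
    (fun (st : String × String × String) r =>
      (pvFill st.1 r "reserveType",
       pvFill st.2.1 r "pickupStationID",
       pvFill st.2.2 r "dropoffStationID"))
    (st.2.2.2.2, st.2.2.1, st.2.2.2.1)
  [("pickupStationName", st.1),
   ("dropoffStationName", st.2.1),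
   ("pickupStationID", st2.2.1),
   ("dropoffStationID", st2.2.2),
   ("reserveType", st2.1)]

-- ===== PRECONDITION & SPEC =====
def Spec_pick_dispatch_info_py (dispatch_rows : List (List (String × String))) (rr_rows : List (List (String × String))) (out : List (String × String)) : Prop := out = pick_dispatch_info_py_alt dispatch_rows rr_rows
instance (dispatch_rows : List (List (String × String))) (rr_rows : List (List (String × String))) (out : List (String × String)) : Decidable (Spec_pick_dispatch_info_py dispatch_rows rr_rows out) := by unfold Spec_pick_dispatch_info_py; infer_instance

-- ===== CLAIM (what is proved, stated in full; the proofs are below) =====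
def Claim_equal_pick_dispatch_info_py : Prop := ∀ (dispatch_rows : List (List (String × String))) (rr_rows : List (List (String × String))), Dom_pick_dispatch_info_py dispatch_rows rr_rows → Spec_pick_dispatch_info_py dispatch_rows rr_rows (pick_dispatch_info_py dispatch_rows rr_rows)

-- ===== LEMMAS AND PROOFS =====

-- the value of one slot after filling it (if still empty) across a row list
def pvG (rows : List (List (String × String))) (x : String) (key : String) : String :=
  if x = "" then pvFirstNonemptyFrom rows key else x

theorem pvG_step (rs : List (List (String × String))) (r : List (String × String)) (x key : String) :
    pvG rs (pvFill x r key) key = pvG (r :: rs) x key := by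
  by_cases hx : x = ""
  · subst hx
    simp only [pvFill, pvG, pvFirstNonemptyFrom]
    cases h : (PySem.Dict.mk r).get? key with
    | none => simp [pvClean]
    | some v =>
      simp only [pvClean]
      by_cases hc : PySem.Str.strip v ≠ "" ∧ PySem.Str.lower (PySem.Str.strip v) ≠ "null"
      · simp [hc.1, hc.2]
      · simp [hc]
  · simp [pvG, pvFill, hx]

theorem pvFold5 (rows : List (List (String × String))) :
    ∀ a b c d e : String,
      rows.foldl
        (fun (st : String × String × String × String × String) r =>
          (pvFill st.1 r "pickupStationName",
           pvFill st.2.1 r "dropoffStationName",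
           pvFill st.2.2.1 r "pickupStationID",
           pvFill st.2.2.2.1 r "dropoffStationID",
           pvFill st.2.2.2.2 r "reserveType")) (a, b, c, d, e)
      = (pvG rows a "pickupStationName", pvG rows b "dropoffStationName",
         pvG rows c "pickupStationID", pvG rows d "dropoffStationID",
         pvG rows e "reserveType") := by
  induction rows with
  | nil =>
    intro a b c d e
    simp only [List.foldl_nil, pvG, pvFirstNonemptyFrom, Prod.mk.injEq]
    refine ⟨?_, ?_, ?_, ?_, ?_⟩ <;> split_ifs with h <;> simp_all
  | cons r rs ih =>
    intro a b c d e
    simp only [List.foldl_cons, ih, pvG_step]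

theorem pvFold3 (rows : List (List (String × String))) :
    ∀ a b c : String,
      rows.foldl
        (fun (st : String × String × String) r =>
          (pvFill st.1 r "reserveType",
           pvFill st.2.1 r "pickupStationID",
           pvFill st.2.2 r "dropoffStationID")) (a, b, c)
      = (pvG rows a "reserveType", pvG rows b "pickupStationID", pvG rows c "dropoffStationID") := by
  induction rows with
  | nil =>
    intro a b c
    simp only [List.foldl_nil, pvG, pvFirstNonemptyFrom, Prod.mk.injEq]
    refine ⟨?_, ?_, ?_⟩ <;> split_ifs with h <;> simp_all
  | cons r rs ih =>
    intro a b c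
    simp only [List.foldl_cons, ih, pvG_step]

-- ===== VERDICT (by name: the statement is the Claim_ definition above) =====
theorem pick_dispatch_info_py_spec : Claim_equal_pick_dispatch_info_py := by
  intro dispatch_rows rr_rows _
  show _ = _
  simp only [pick_dispatch_info_py, pick_dispatch_info_py_alt, pvFold5, pvFold3, pvG]
  simp
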